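-- pv_equiv track=rewrite | github.com/acrion/ditana-assistant | ditana_assistant/engine/text_processors_regex.py | extract_backtick_content
-- ===== SOURCE A (Python) =====
-- def extract_backtick_content(text: str):
--     """
--     Extracts the stripped text enclosed by backticks from the input string.
--
--     If no backticks are found or the enclosed stripped text is empty,
--     the entire input string (stripped) is returned.
--
--     The function uses a robust strategy to handle multiple consecutive backticks:
--     It searches for and removes all immediately following backticks after the first one,
--     both from the front and back.
--
--     Nested backticks remain unaffected, as only consecutive backticks are removed.
--
--     If fewer than 2 backticks are in the string, the entire stripped text is returned.
--
--     Args: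
--         text (str): The input string to process.
--
--     Returns:
--         str: The extracted and stripped content between backticks, or the entire
--              stripped input if no valid backtick-enclosed content is found.
--     """
--     stripped_text = text.strip()
--
--     # Find the first backtick from the left
--     left_index = stripped_text.find('`')
--     if left_index == -1:
--         return stripped_text
--
--     # Find consecutive backticks from the left
--     while left_index + 1 < len(stripped_text) and stripped_text[left_index + 1] == '`':
--         left_index += 1
--
--     # Find the first backtick from the right
--     right_index = stripped_text.rfind('`')
--     if right_index == left_index:
--         return stripped_text
--
--     # Find consecutive backticks from the right
--     while right_index > left_index and stripped_text[right_index - 1] == '`':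
--         right_index -= 1
--
--     # Extract and strip the content between backticks
--     extracted_content = stripped_text[left_index + 1:right_index].strip()
--
--     # Return the extracted content if not empty, otherwise return the entire stripped text
--     return extracted_content if extracted_content else stripped_text
-- ===== SOURCE B (Python) =====
-- def extract_backtick_content(text: str):
--     """Tokenize-and-reassemble: split the string on backticks, discard the prefix,
--     the suffix and the empty tokens produced by the outer backtick runs, and glue
--     the remaining tokens back together with backticks."""
--     s = text.strip()
--     parts = s.split('`')
--     if len(parts) == 1:
--         return s
--     middle = parts[1:-1]
--     while middle and not middle[0]:
--         middle.pop(0)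
--     while middle and not middle[-1]:
--         middle.pop()
--     content = '`'.join(middle).strip()
--     return content if content else s
-- ===== Notes on version B (the rewrite author's own statement) =====
-- stated objective: alternative
-- what changed: Replaces A's index arithmetic (find, two in-place while-loops extending the backtick runs, rfind, slicing) by tokenization: split the string on backticks, drop the prefix token, the suffix token and the empty tokens produced by the outer backtick runs, and join the remaining tokens back with backticks.
import Mathlib
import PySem

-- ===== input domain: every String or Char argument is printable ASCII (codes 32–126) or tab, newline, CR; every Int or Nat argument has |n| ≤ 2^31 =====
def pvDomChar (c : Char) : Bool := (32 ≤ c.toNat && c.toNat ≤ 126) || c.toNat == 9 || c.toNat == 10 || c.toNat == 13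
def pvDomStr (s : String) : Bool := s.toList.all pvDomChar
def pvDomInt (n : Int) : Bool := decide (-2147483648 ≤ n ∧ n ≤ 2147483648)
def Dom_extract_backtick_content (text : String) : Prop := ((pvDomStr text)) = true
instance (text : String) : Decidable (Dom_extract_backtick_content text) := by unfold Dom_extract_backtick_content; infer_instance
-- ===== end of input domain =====

-- B replaces A's index arithmetic (find / two while-loop run extensions / rfind / slice) by
-- tokenization: split on backticks, discard the prefix, suffix and the empty tokens of the
-- outer backtick runs, and join the remaining tokens back with backticks; objective: alternative.

-- ===== PORT A =====
-- while left_index + 1 < len(s) and s[left_index + 1] == '`': left_index += 1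
-- (the guard keeps the index in range, so getD is exact Python indexing here)
def pvExtendL (l : List Char) (i : Nat) : Nat :=
  if h : i + 1 < l.length ∧ l.getD (i + 1) ' ' = '`' then pvExtendL l (i + 1) else i
termination_by l.length - i
decreasing_by omega

-- while right_index > left_index and s[right_index - 1] == '`': right_index -= 1
def pvExtendR (l : List Char) (li ri : Nat) : Nat :=
  if li < ri ∧ l.getD (ri - 1) ' ' = '`' then pvExtendR l li (ri - 1) else ri
termination_by ri
decreasing_by omega

def pvACore (l : List Char) : List Char :=
  let li0 := PySem.Chars.find l ['`']
  if li0 = -1 then l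
  else
    let li := pvExtendL l li0.toNat
    let ri0 := PySem.Chars.rfind l ['`']
    if ri0 = (li : Int) then l
    else
      let ri := pvExtendR l li ri0.toNat
      let content := PySem.Chars.strip (PySem.List.slice l (some ((li : Int) + 1)) (some ((ri : Nat) : Int)))
      if content = [] then l else content

def extract_backtick_content (text : String) : String :=
  String.ofList (pvACore (PySem.Chars.strip text.toList))

-- ===== PORT B =====
-- parts = s.split('`') is PySem.Chars.splitOn; parts[1:-1] is PySem.List.slice;
-- the two '' -popping while-loops are dropWhile isEmpty from the front resp. (via reverse) the back;
-- '`'.join is PySem.Chars.join.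
def pvBCore (s : List Char) : List Char :=
  let parts := PySem.Chars.splitOn s ['`']
  if parts.length = 1 then s
  else
    let middle := PySem.List.slice parts (some 1) (some (-1))
    let middle1 := middle.dropWhile (fun x => x.isEmpty)
    let middle2 := (middle1.reverse.dropWhile (fun x => x.isEmpty)).reverse
    let content := PySem.Chars.strip (PySem.Chars.join ['`'] middle2)
    if content = [] then s else content

def extract_backtick_content_alt (text : String) : String :=
  String.ofList (pvBCore (PySem.Chars.strip text.toList))

-- ===== PRECONDITION & SPEC =====
def Spec_extract_backtick_content (text : String) (out : String) : Prop := out = extract_backtick_content_alt text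
instance (text : String) (out : String) : Decidable (Spec_extract_backtick_content text out) := by unfold Spec_extract_backtick_content; infer_instance

-- ===== CLAIM (what is proved, stated in full; the proofs are below) =====
def Claim_equal_extract_backtick_content : Prop := ∀ (text : String), Dom_extract_backtick_content text → Spec_extract_backtick_content text (extract_backtick_content text)

-- ===== LEMMAS AND PROOFS =====

-- ---- generic facts about A's primitives (find / rfind / the run-extension loops) ----

lemma pv_prefix_singleton (c : Char) (l : List Char) (i : Nat) :
    [c] <+: l.drop i ↔ l[i]? = some c := by
  rw [← List.head?_drop]
  cases h : (l.drop i) with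
  | nil => simp
  | cons a t => simp [List.cons_prefix_cons, eq_comm]

lemma pv_isPrefixOf_drop (c : Char) (l : List Char) (i : Nat) :
    ([c].isPrefixOf (l.drop i)) = true ↔ l[i]? = some c := by
  rw [List.isPrefixOf_iff_prefix]; exact pv_prefix_singleton c l i

lemma pv_dropWhile_head (P : Char → Bool) (l : List Char) (hne : l.dropWhile P ≠ []) :
    ∃ c t, l.dropWhile P = c :: t ∧ P c = false := by
  have h := List.head?_dropWhile_not P l
  cases hd : l.dropWhile P with
  | nil => exact absurd hd hne
  | cons c t =>
    refine ⟨c, t, rfl, ?_⟩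
    rw [hd] at h; simpa using h

lemma pv_find_eq (l : List Char) (h : '`' ∈ l) :
    PySem.Chars.find l ['`'] = ((l.takeWhile (fun c => c != '`')).length : Int) := by
  have hinf : ['`'] <:+: l := (List.singleton_infix_iff _ _).mpr h
  have h0 : 0 ≤ PySem.Chars.find l ['`'] := (PySem.Chars.find_nonneg_iff l ['`']).mpr hinf
  obtain ⟨hpre, hmin⟩ := PySem.Chars.find_spec h0
  set n := (PySem.Chars.find l ['`']).toNat with hn
  set tw := l.takeWhile (fun c => c != '`') with htw
  have hgn : l[n]? = some '`' := (pv_prefix_singleton '`' l n).mp hpre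
  have heq : n = tw.length := by
    rcases lt_trichotomy n tw.length with h1 | h1 | h1
    · exfalso
      obtain ⟨rest, hrest⟩ := List.takeWhile_prefix (l := l) (fun c => c != '`')
      have : l[n]? = tw[n]? := by
        rw [← hrest, List.getElem?_append_left (by omega)]
      rw [this, List.getElem?_eq_getElem (by omega)] at hgn
      have hmem : tw[n] ∈ tw := List.getElem_mem _
      have := List.mem_takeWhile_imp (p := fun c => c != '`') (l := l) hmem
      simp only [Option.some_inj] at hgn
      rw [hgn] at this; simp at this
    · exact h1
    · exfalso
      apply hmin tw.length h1
      rw [pv_prefix_singleton]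
      have hsp : tw ++ l.dropWhile (fun c => c != '`') = l := List.takeWhile_append_dropWhile
      have hdne : l.dropWhile (fun c => c != '`') ≠ [] := by
        intro h0'
        rw [List.dropWhile_eq_nil_iff] at h0'
        have := h0' '`' h
        simp at this
      obtain ⟨c, t, hct, hcf⟩ := pv_dropWhile_head _ _ hdne
      have hc : c = '`' := by simpa using hcf
      rw [← hsp, List.getElem?_append_right (le_refl _), hct]
      simp [hc]
  rw [← heq]
  exact (Int.toNat_of_nonneg h0).symm

lemma pv_rfind_go_eq (l : List Char) (j : Nat) :
    PySem.Chars.rfind.go l ['`'] j =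
      if ∃ i, i ≤ j ∧ l[i]? = some '`' then
        ((Nat.findGreatest (fun i => l[i]? = some '`') j : Nat) : Int)
      else -1 := by
  induction j with
  | zero =>
    rw [PySem.Chars.rfind.go]
    by_cases h : l[0]? = some '`'
    · rw [if_pos ?_, if_pos ⟨0, le_refl 0, h⟩]
      · simp [Nat.findGreatest_zero]
      · rw [List.isPrefixOf_iff_prefix]
        simpa using (pv_prefix_singleton '`' l 0).mpr h
    · rw [if_neg ?_, if_neg ?_]
      · rintro ⟨i, hi, hg⟩; interval_cases i; exact h hg
      · rw [List.isPrefixOf_iff_prefix]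
        intro hp
        exact h (by simpa using (pv_prefix_singleton '`' l 0).mp (by simpa using hp))
  | succ j ih =>
    rw [PySem.Chars.rfind.go]
    by_cases h : l[j+1]? = some '`'
    · rw [if_pos (by rw [pv_isPrefixOf_drop]; exact h), if_pos ⟨j+1, le_refl _, h⟩]
      rw [Nat.findGreatest_succ, if_pos h]
    · rw [if_neg (by rw [pv_isPrefixOf_drop]; simpa using h), ih]
      have he : (∃ i, i ≤ j ∧ l[i]? = some '`') ↔ (∃ i, i ≤ j + 1 ∧ l[i]? = some '`') := by
        constructor
        · rintro ⟨i, hi, hg⟩; exact ⟨i, by omega, hg⟩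
        · rintro ⟨i, hi, hg⟩
          rcases Nat.lt_or_ge i (j+1) with h1 | h1
          · exact ⟨i, by omega, hg⟩
          · exact absurd hg (show ¬ l[i]? = some '`' by
              have hij : i = j + 1 := by omega
              rw [hij]; exact h)
      rw [Nat.findGreatest_succ, if_neg h]
      by_cases he2 : ∃ i, i ≤ j ∧ l[i]? = some '`'
      · rw [if_pos he2, if_pos (he.mp he2)]
      · rw [if_neg he2, if_neg (fun hx => he2 (he.mpr hx))]

lemma pv_rfind_eq (l : List Char) (m : Nat) (hm : l[m]? = some '`')
    (hmax : ∀ i, m < i → l[i]? ≠ some '`') :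
    PySem.Chars.rfind l ['`'] = (m : Int) := by
  have hmlt : m < l.length := by
    by_contra h
    rw [List.getElem?_eq_none (by omega)] at hm
    simp at hm
  rw [PySem.Chars.rfind, pv_rfind_go_eq, if_pos ⟨m, by omega, hm⟩]
  norm_cast
  rw [Nat.findGreatest_eq_iff]
  exact ⟨by omega, fun _ => hm, fun n hn _ => hmax n hn⟩

lemma pv_extendL_eq (l : List Char) (i : Nat) :
    pvExtendL l i = i + ((l.drop (i + 1)).takeWhile (fun c => c == '`')).length := by
  by_cases h : i + 1 < l.length ∧ l.getD (i + 1) ' ' = '`'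
  · rw [pvExtendL, dif_pos h, pv_extendL_eq l (i + 1), List.drop_eq_getElem_cons h.1]
    have hg : l[i+1] = '`' := by rw [← List.getD_eq_getElem l ' ' h.1]; exact h.2
    simp [hg]
    omega
  · rw [pvExtendL, dif_neg h]
    rcases Nat.lt_or_ge (i + 1) l.length with hlt | hge
    · have hg : l.getD (i + 1) ' ' ≠ '`' := fun hc => h ⟨hlt, hc⟩
      rw [List.drop_eq_getElem_cons hlt]
      have hb : (l[i+1] == '`') = false := by
        rw [← List.getD_eq_getElem l ' ' hlt] at *; simpa using hg
      simp [hb]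
    · rw [List.drop_eq_nil_of_le hge]; simp
termination_by l.length - i
decreasing_by omega

lemma pv_extendR_stop (l : List Char) (li a : Nat) (h : ¬(li < a ∧ l.getD (a - 1) ' ' = '`')) :
    pvExtendR l li a = a := by
  rw [pvExtendR, if_neg h]

lemma pv_extendR_run (l : List Char) (li a : Nat) (k : Nat) (ha : li < a)
    (hrun : ∀ j, a ≤ j → j < a + k → l.getD j ' ' = '`') :
    pvExtendR l li (a + k) = pvExtendR l li a := by
  induction k with
  | zero => rfl
  | succ k ih =>
    rw [pvExtendR, if_pos ⟨by omega, by simpa using hrun (a + k) (by omega) (by omega)⟩]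
    have h2 : a + (k + 1) - 1 = a + k := by omega
    rw [h2, ih (fun j h1 h2 => hrun j h1 (by omega))]

lemma pv_dropWhile_tick (l : List Char) (h : '`' ∈ l) :
    ∃ t, l.dropWhile (fun c => c != '`') = '`' :: t := by
  have hdne : l.dropWhile (fun c => c != '`') ≠ [] := by
    intro h0; rw [List.dropWhile_eq_nil_iff] at h0; simpa using h0 '`' h
  obtain ⟨c, t, hct, hcf⟩ := pv_dropWhile_head _ _ hdne
  have hc : c = '`' := by simpa using hcf
  exact ⟨t, by rwa [hc] at hct⟩

lemma pv_getElem_mid (x z : List Char) (c : Char) : (x ++ c :: z)[x.length]? = some c := by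
  rw [List.getElem?_append_right (le_refl _)]; simp

lemma pv_getElem_after (x z : List Char) (c : Char) (i : Nat) (hi : x.length < i) :
    (x ++ c :: z)[i]? = z[i - x.length - 1]? := by
  rw [List.getElem?_append_right (by omega)]
  obtain ⟨m, hm⟩ : ∃ m, i - x.length = m + 1 := ⟨i - x.length - 1, by omega⟩
  rw [hm, List.getElem?_cons_succ]
  simp

lemma pv_run_getElem (c : Char) (q z : List Char) (h : ∀ x ∈ q, x = c) :
    (c :: (q ++ z))[q.length]? = some c := by
  induction q generalizing c with
  | nil => simp
  | cons a q' ih =>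
    have ha : a = c := h a (by simp)
    subst ha
    simpa using ih a (fun x hx => h x (by simp [hx]))

-- ---- B's split: a fuel-free characterisation pvSplit1 of PySem.Chars.splitOn · ['`'] ----

def pvSplit1 : List Char → List (List Char)
  | [] => [[]]
  | c :: t => if c = '`' then [] :: pvSplit1 t else (pvSplit1 t).modifyHead (c :: ·)

lemma pv_split1_ne_nil (l : List Char) : pvSplit1 l ≠ [] := by
  cases l with
  | nil => simp [pvSplit1]
  | cons c t =>
    simp only [pvSplit1]
    split_ifs
    · simp
    · cases h : pvSplit1 t with
      | nil => exact absurd h (pv_split1_ne_nil t)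
      | cons a b => simp

lemma pv_splitOn_go_eq (fuel : Nat) (l cur : List Char) (acc : List (List Char))
    (hf : l.length < fuel) :
    PySem.Chars.splitOn.go ['`'] fuel l cur acc
      = acc.reverse ++ (pvSplit1 l).modifyHead (cur.reverse ++ ·) := by
  match fuel, l with
  | fuel + 1, [] => simp [PySem.Chars.splitOn.go, pvSplit1]
  | fuel + 1, c :: rest =>
    rw [PySem.Chars.splitOn.go]
    by_cases hc : c = '`'
    · rw [if_pos (by subst hc; simp [List.isPrefixOf])]
      rw [pv_splitOn_go_eq fuel _ [] _ (by simp at hf ⊢; omega)]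
      subst hc
      have hid : ∀ (X : List (List Char)), List.modifyHead (fun x : List Char => x) X = X := by
        intro X; cases X <;> rfl
      simp [pvSplit1, hid]
    · rw [if_neg (by simp [List.isPrefixOf]; exact fun h => hc h.symm)]
      rw [pv_splitOn_go_eq fuel rest (c :: cur) acc (by simp at hf ⊢; omega)]
      simp only [pvSplit1, if_neg hc, List.modifyHead_modifyHead]
      cases h : pvSplit1 rest with
      | nil => exact absurd h (pv_split1_ne_nil rest)
      | cons a b => simp

lemma pv_splitOn_eq (l : List Char) : PySem.Chars.splitOn l ['`'] = pvSplit1 l := by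
  rw [PySem.Chars.splitOn, pv_splitOn_go_eq _ _ _ _ (by omega)]
  cases h : pvSplit1 l with
  | nil => exact absurd h (pv_split1_ne_nil l)
  | cons a b => simp

lemma pv_split1_no_tick (l : List Char) (h : '`' ∉ l) : pvSplit1 l = [l] := by
  induction l with
  | nil => rfl
  | cons c t ih =>
    have hc : ¬ c = '`' := fun hh => h (by simp [hh])
    rw [pvSplit1, if_neg hc, ih (fun hm => h (by simp [hm]))]
    rfl

lemma pv_split1_append_tick (x w : List Char) :
    pvSplit1 (x ++ '`' :: w) = pvSplit1 x ++ pvSplit1 w := by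
  induction x with
  | nil => simp [pvSplit1]
  | cons c t ih =>
    by_cases hc : c = '`'
    · simp [pvSplit1, hc, ih]
    · simp only [List.cons_append, pvSplit1, if_neg hc, ih]
      cases h : pvSplit1 t with
      | nil => exact absurd h (pv_split1_ne_nil t)
      | cons a b => simp

lemma pv_split1_replicate_left (k : Nat) (r : List Char) :
    pvSplit1 (List.replicate k '`' ++ r) = List.replicate k [] ++ pvSplit1 r := by
  induction k with
  | zero => simp
  | succ k ih => simp [List.replicate_succ, pvSplit1, ih]

lemma pv_split1_replicate (k : Nat) :
    pvSplit1 (List.replicate k '`') = List.replicate k [] ++ [[]] := by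
  have h := pv_split1_replicate_left k []
  simpa [pvSplit1] using h

lemma pv_split1_replicate_right (y : List Char) (k : Nat) :
    pvSplit1 (y ++ List.replicate k '`') = pvSplit1 y ++ List.replicate k [] := by
  cases k with
  | zero => simp
  | succ k =>
    rw [List.replicate_succ, pv_split1_append_tick, pv_split1_replicate]
    simp [List.replicate_succ']

lemma pv_intercalate_cons_cons (sep a b : List Char) (l : List (List Char)) :
    sep.intercalate (a :: b :: l) = a ++ sep ++ sep.intercalate (b :: l) := by
  simp [List.intercalate, List.intersperse]

lemma pv_join_split1 (l : List Char) :
    PySem.Chars.join ['`'] (pvSplit1 l) = l := by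
  rw [PySem.Chars.join]
  induction l with
  | nil => rfl
  | cons c t ih =>
    by_cases hc : c = '`'
    · rw [pvSplit1, if_pos hc]
      cases h : pvSplit1 t with
      | nil => exact absurd h (pv_split1_ne_nil t)
      | cons a b =>
        rw [h] at ih
        rw [pv_intercalate_cons_cons]
        subst hc
        simpa using ih
    · rw [pvSplit1, if_neg hc]
      cases h : pvSplit1 t with
      | nil => exact absurd h (pv_split1_ne_nil t)
      | cons a b =>
        rw [h] at ih
        cases b with
        | nil =>
          simp only [List.modifyHead_cons, List.intercalate, List.intersperse,
            List.flatten] at ih ⊢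
          simp_all
        | cons b1 b2 =>
          rw [List.modifyHead_cons, pv_intercalate_cons_cons]
          rw [pv_intercalate_cons_cons] at ih
          simpa using congrArg (c :: ·) ih

lemma pv_split1_last (c : Char) (hc : ¬ c = '`') (w : List Char) :
    ∃ ini e, pvSplit1 (w ++ [c]) = ini ++ [e] ∧ e ≠ [] := by
  induction w with
  | nil => exact ⟨[], [c], by simp [pvSplit1, hc]⟩
  | cons a w' ih =>
    obtain ⟨ini, e, he, hne⟩ := ih
    by_cases ha : a = '`'
    · exact ⟨[] :: ini, e, by simp [pvSplit1, ha, he], hne⟩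
    · cases ini with
      | nil => exact ⟨[], a :: e, by simp_all [pvSplit1], by simp⟩
      | cons i0 it => exact ⟨(a :: i0) :: it, e, by simp_all [pvSplit1], hne⟩

lemma pv_dw_app {α : Type} (P : α → Bool) (l₁ l₂ : List α) (h : ∀ x ∈ l₁, P x = true) :
    (l₁ ++ l₂).dropWhile P = l₂.dropWhile P := by
  induction l₁ with
  | nil => simp
  | cons a t ih =>
    simp only [List.cons_append, List.dropWhile_cons, h a (by simp)]
    exact ih (fun x hx => h x (by simp [hx]))

-- parts[1:-1]
lemma pv_slice_one_negone {α : Type} (xs : List α) :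
    PySem.List.slice xs (some 1) (some (-1)) = xs.tail.dropLast := by
  cases xs with
  | nil => simp [PySem.List.slice, PySem.List.clampIdx]
  | cons x t =>
    simp [PySem.List.slice, PySem.List.clampIdx, List.dropLast_eq_take]
    split_ifs <;> simp
    omega

-- main equivalence of the two cores
lemma pv_core_eq (s : List Char) : pvACore s = pvBCore s := by
  by_cases hmem : '`' ∈ s
  case neg =>
    have hfind : PySem.Chars.find s ['`'] = -1 := by
      rw [PySem.Chars.find_eq_neg_one_iff]
      simp [List.singleton_infix_iff, hmem]
    simp [pvACore, pvBCore, hfind, pv_splitOn_eq, pv_split1_no_tick s hmem]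
  case pos =>
    obtain ⟨t, hdt⟩ := pv_dropWhile_tick s hmem
    set p := s.takeWhile (fun c => c != '`') with hp
    have hps : s = p ++ '`' :: t := by
      conv_lhs => rw [← List.takeWhile_append_dropWhile (p := fun c => c != '`') (l := s)]
      rw [hdt]
    have hpno : '`' ∉ p := by
      intro hx
      have := List.mem_takeWhile_imp (p := fun c => c != '`') (l := s) (hp ▸ hx)
      simp at this
    set q := t.takeWhile (fun c => c == '`') with hq
    set r := t.dropWhile (fun c => c == '`') with hr
    have hqall : ∀ x ∈ q, x = '`' := by
      intro x hx
      have := List.mem_takeWhile_imp (p := fun c => c == '`') (l := t) (hq ▸ hx)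
      simpa using this
    have hqr : q ++ r = t := List.takeWhile_append_dropWhile
    have hfind : PySem.Chars.find s ['`'] = ((p.length : Nat) : Int) := by
      rw [pv_find_eq s hmem, ← hp]
    have hdrop1 : s.drop (p.length + 1) = t := by
      rw [hps, show p ++ '`' :: t = (p ++ ['`']) ++ t by simp,
        show p.length + 1 = (p ++ ['`']).length by simp, List.drop_left]
    have hL : pvExtendL s p.length = p.length + q.length := by
      rw [pv_extendL_eq, hdrop1, ← hq]
    have hqrep : q = List.replicate q.length '`' := List.eq_replicate_of_mem hqall
    have hsplitT : pvSplit1 t = List.replicate q.length [] ++ pvSplit1 r := by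
      conv_lhs => rw [← hqr, hqrep]
      rw [pv_split1_replicate_left]
    have hparts : PySem.Chars.splitOn s ['`']
        = p :: (List.replicate q.length [] ++ pvSplit1 r) := by
      rw [pv_splitOn_eq, hps, pv_split1_append_tick, pv_split1_no_tick p hpno, ← hsplitT]
      rfl
    have hrlen : 0 < (pvSplit1 r).length := List.length_pos_of_ne_nil (pv_split1_ne_nil r)
    have hlenne : ¬ ((p :: (List.replicate q.length [] ++ pvSplit1 r)).length = 1) := by
      simp only [List.length_cons, List.length_append, List.length_replicate]
      omega
    by_cases hb : '`' ∈ r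
    case neg =>
      -- A returns s (the last backtick is the end of the first run)
      have hgetm : s[p.length + q.length]? = some '`' := by
        rw [hps, ← hqr, List.getElem?_append_right (by omega)]
        rw [show p.length + q.length - p.length = q.length by omega]
        exact pv_run_getElem '`' q r hqall
      have hmax : ∀ i, p.length + q.length < i → s[i]? ≠ some '`' := by
        intro i hi hg
        rw [hps, ← hqr, show p ++ '`' :: (q ++ r) = (p ++ '`' :: q) ++ r by simp] at hg
        rw [List.getElem?_append_right (by simp; omega)] at hg
        exact hb (List.mem_of_getElem? hg)
      have hrfind : PySem.Chars.rfind s ['`'] = ((p.length + q.length : Nat) : Int) :=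
        pv_rfind_eq s (p.length + q.length) hgetm hmax
      have hAeq : pvACore s = s := by
        simp [pvACore, hfind, hrfind, Int.toNat_natCast, hL]
      -- B: the middle tokens are exactly the empties of the single run
      have hsplitr : pvSplit1 r = [r] := pv_split1_no_tick r hb
      have hBeq : pvBCore s = s := by
        simp only [pvBCore, hparts]
        rw [if_neg hlenne]
        simp only [pv_slice_one_negone, List.tail_cons, hsplitr, List.dropLast_concat,
          List.dropWhile_replicate]
        simp [PySem.Chars.join, PySem.Chars.strip, PySem.Chars.lstrip, PySem.Chars.rstrip,
          List.intercalate]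
      rw [hAeq, hBeq]
    case pos =>
      have hrne : r ≠ [] := by intro h0; rw [h0] at hb; simp at hb
      obtain ⟨c0, t0, hct0, hc0⟩ := pv_dropWhile_head (fun c => c == '`') t (by rw [← hr]; exact hrne)
      have hct0' : r = c0 :: t0 := by rw [hr]; exact hct0
      have hbrev : '`' ∈ r.reverse := by simpa using hb
      obtain ⟨u, heu⟩ := pv_dropWhile_tick r.reverse hbrev
      set v := r.reverse.takeWhile (fun c => c != '`') with hv
      have hvno : ∀ x ∈ v, x ≠ '`' := by
        intro x hx
        have := List.mem_takeWhile_imp (p := fun c => c != '`') (l := r.reverse) (hv ▸ hx)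
        simpa using this
      have hrrev : r.reverse = v ++ '`' :: u := by
        conv_lhs => rw [← List.takeWhile_append_dropWhile (p := fun c => c != '`') (l := r.reverse)]
        rw [heu]
      set g := u.takeWhile (fun c => c == '`') with hg
      set b' := u.dropWhile (fun c => c == '`') with hb'
      have hgall : ∀ x ∈ g, x = '`' := by
        intro x hx
        have := List.mem_takeWhile_imp (p := fun c => c == '`') (l := u) (hg ▸ hx)
        simpa using this
      have hgb : g ++ b' = u := List.takeWhile_append_dropWhile
      have hrdec : r = b'.reverse ++ (g.reverse ++ '`' :: v.reverse) := by
        have h1 : r = (v ++ '`' :: u).reverse := by rw [← hrrev, List.reverse_reverse]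
        rw [h1, ← hgb]
        simp
      have hb'ne : b' ≠ [] := by
        intro h0
        rw [h0, hct0'] at hrdec
        simp only [List.reverse_nil, List.nil_append] at hrdec
        cases hgr : g.reverse with
        | nil =>
          rw [hgr] at hrdec
          simp at hrdec
          simp [hrdec.1] at hc0
        | cons a gg =>
          rw [hgr] at hrdec
          simp only [List.cons_append, List.cons.injEq] at hrdec
          have ha : a ∈ g := by rw [← List.mem_reverse, hgr]; simp
          have : a = '`' := hgall a ha
          rw [hrdec.1, this] at hc0
          simp at hc0
      obtain ⟨c1, u1, hcu1, hc1⟩ := pv_dropWhile_head (fun c => c == '`') u (by rw [← hb']; exact hb'ne)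
      have hcu1' : b' = c1 :: u1 := by rw [hb']; exact hcu1
      have hc1' : ¬ c1 = '`' := by simpa using hc1
      -- ======== A side (find/rfind/extend/slice) ========
      have hsplit1 : s = (p ++ '`' :: (q ++ (b'.reverse ++ g.reverse))) ++ '`' :: v.reverse := by
        rw [hps, ← hqr, hrdec]; simp
      have hsplit2 : s = (p ++ '`' :: (q ++ b'.reverse)) ++ (g.reverse ++ '`' :: v.reverse) := by
        rw [hps, ← hqr, hrdec]; simp
      have hsplit3 : s = (p ++ '`' :: (q ++ u1.reverse)) ++ c1 :: (g.reverse ++ '`' :: v.reverse) := by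
        rw [hps, ← hqr, hrdec, hcu1']; simp
      have hsplit4 : s = (p ++ '`' :: q) ++ (b'.reverse ++ (g.reverse ++ '`' :: v.reverse)) := by
        rw [hps, ← hqr, hrdec]; simp
      have hlen1 : (p ++ '`' :: (q ++ (b'.reverse ++ g.reverse))).length
          = p.length + 1 + q.length + (u1.length + 1) + g.length := by
        simp [hcu1']; omega
      have hgetm : s[p.length + 1 + q.length + (u1.length + 1) + g.length]? = some '`' := by
        rw [hsplit1, ← hlen1]
        exact pv_getElem_mid _ _ _
      have hmax : ∀ i, p.length + 1 + q.length + (u1.length + 1) + g.length < i → s[i]? ≠ some '`' := by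
        intro i hi hg2
        rw [hsplit1, pv_getElem_after _ _ _ i (by rw [hlen1]; omega)] at hg2
        have hx : '`' ∈ v := by simpa using List.mem_of_getElem? hg2
        exact hvno _ hx rfl
      have hrfind : PySem.Chars.rfind s ['`']
          = ((p.length + 1 + q.length + (u1.length + 1) + g.length : Nat) : Int) :=
        pv_rfind_eq s _ hgetm hmax
      have hrun : ∀ j, p.length + 1 + q.length + (u1.length + 1) ≤ j →
          j < p.length + 1 + q.length + (u1.length + 1) + g.length → s.getD j ' ' = '`' := by
        intro j h1 h2
        rw [List.getD_eq_getElem?_getD, hsplit2,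
          List.getElem?_append_right (by simp [hcu1']; omega),
          List.getElem?_append_left (by simp [hcu1']; omega)]
        have hj : j - (p ++ '`' :: (q ++ b'.reverse)).length < g.reverse.length := by
          simp [hcu1']; omega
        rw [List.getElem?_eq_getElem hj, Option.getD_some]
        exact hgall _ (List.mem_reverse.mp (List.getElem_mem _))
      have hstop : s.getD (p.length + 1 + q.length + u1.length) ' ' = c1 := by
        have hlen3 : (p ++ '`' :: (q ++ u1.reverse)).length = p.length + 1 + q.length + u1.length := by
          simp; omega
        rw [List.getD_eq_getElem?_getD, hsplit3, ← hlen3, pv_getElem_mid]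
        rfl
      have hext : pvExtendR s (p.length + q.length)
          (p.length + 1 + q.length + (u1.length + 1) + g.length) = p.length + 1 + q.length + (u1.length + 1) := by
        rw [pv_extendR_run s (p.length + q.length) (p.length + 1 + q.length + (u1.length + 1)) g.length
          (by omega) hrun]
        apply pv_extendR_stop
        rintro ⟨h1, h2⟩
        rw [show p.length + 1 + q.length + (u1.length + 1) - 1 = p.length + 1 + q.length + u1.length by omega,
          hstop] at h2
        rw [h2] at hc1
        simp at hc1
      have hdropb : s.drop (p.length + q.length + 1) = b'.reverse ++ (g.reverse ++ '`' :: v.reverse) := by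
        rw [hsplit4, show p.length + q.length + 1 = (p ++ '`' :: q).length by simp; omega, List.drop_left]
      have hslice : PySem.List.slice s (some (((p.length + q.length : Nat) : Int) + 1))
          (some ((p.length + 1 + q.length + (u1.length + 1) : Nat) : Int)) = b'.reverse := by
        rw [show (((p.length + q.length : Nat) : Int) + 1) = ((p.length + q.length + 1 : Nat) : Int) by push_cast; ring]
        rw [PySem.List.slice_natCast, hdropb,
          show p.length + 1 + q.length + (u1.length + 1) - (p.length + q.length + 1) = b'.reverse.length by
            simp [hcu1']; omega]
        exact List.take_left
      have hAeq : pvACore s = (if PySem.Chars.strip b'.reverse = [] then s else PySem.Chars.strip b'.reverse) := by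
        simp only [pvACore, hfind, hrfind, Int.toNat_natCast, hL]
        rw [if_neg (by omega), if_neg (by push_cast; omega), hext, hslice]
      -- ======== B side (split / drop empties / join) ========
      have hgrep : g.reverse = List.replicate g.length '`' := by
        have := List.eq_replicate_of_mem (a := '`') (l := g.reverse)
          (fun x hx => hgall x (List.mem_reverse.mp hx))
        simpa using this
      have hvno' : '`' ∉ v.reverse := fun hx => hvno '`' (List.mem_reverse.mp hx) rfl
      have hsplitr : pvSplit1 r = (pvSplit1 b'.reverse ++ List.replicate g.length []) ++ [v.reverse] := by
        rw [hrdec, show b'.reverse ++ (g.reverse ++ '`' :: v.reverse)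
            = (b'.reverse ++ g.reverse) ++ '`' :: v.reverse by simp,
          pv_split1_append_tick, pv_split1_no_tick _ hvno', hgrep, pv_split1_replicate_right]
      -- head of pvSplit1 b'.reverse is a nonempty token
      obtain ⟨zz, hzz⟩ : ∃ zz, b'.reverse = c0 :: zz := by
        have h2 : b'.reverse ++ (g.reverse ++ '`' :: v.reverse) = c0 :: t0 := by
          rw [← hrdec]; exact hct0'
        cases hbr : b'.reverse with
        | nil => exact absurd (by simpa using hbr) hb'ne
        | cons z0 zz2 =>
          rw [hbr] at h2
          simp only [List.cons_append, List.cons.injEq] at h2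
          exact ⟨zz2, congrArg (· :: zz2) h2.1⟩
      have hc0' : ¬ c0 = '`' := by simpa using hc0
      obtain ⟨h0, rest0, hh0⟩ : ∃ h0 rest0, pvSplit1 b'.reverse = (c0 :: h0) :: rest0 := by
        rw [hzz, pvSplit1, if_neg hc0']
        cases hz : pvSplit1 zz with
        | nil => exact absurd hz (pv_split1_ne_nil zz)
        | cons a bb => exact ⟨a, bb, by simp⟩
      -- last of pvSplit1 b'.reverse is a nonempty token
      obtain ⟨ini, e, hie, hene⟩ : ∃ ini e, pvSplit1 b'.reverse = ini ++ [e] ∧ e ≠ [] := by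
        have : b'.reverse = u1.reverse ++ [c1] := by rw [hcu1']; simp
        rw [this]
        exact pv_split1_last c1 hc1' u1.reverse
      have hmiddle1 : ((List.replicate q.length [] ++ (pvSplit1 b'.reverse ++ List.replicate g.length []))).dropWhile
          (fun x : List Char => x.isEmpty) = pvSplit1 b'.reverse ++ List.replicate g.length [] := by
        rw [pv_dw_app _ _ _ (by intro x hx; rw [List.eq_of_mem_replicate hx]; rfl)]
        rw [hh0]
        simp
      have hmiddle2 : ((pvSplit1 b'.reverse ++ List.replicate g.length []).reverse.dropWhile
          (fun x : List Char => x.isEmpty)).reverse = pvSplit1 b'.reverse := by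
        rw [List.reverse_append, pv_dw_app _ _ _ (by
          intro x hx
          rw [List.eq_of_mem_replicate (List.mem_reverse.mp hx)]; rfl)]
        rw [hie]
        simp only [List.reverse_append, List.reverse_cons, List.reverse_nil, List.nil_append,
          List.cons_append, List.dropWhile_cons]
        rw [show (e.isEmpty) = false by cases e with | nil => exact absurd rfl hene | cons a b => rfl]
        simp
      have hBeq : pvBCore s = (if PySem.Chars.strip b'.reverse = [] then s else PySem.Chars.strip b'.reverse) := by
        simp only [pvBCore, hparts]
        rw [if_neg hlenne]
        simp only [pv_slice_one_negone, List.tail_cons, hsplitr]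
        rw [show List.replicate q.length [] ++ ((pvSplit1 b'.reverse ++ List.replicate g.length []) ++ [v.reverse])
            = (List.replicate q.length [] ++ (pvSplit1 b'.reverse ++ List.replicate g.length [])) ++ [v.reverse] by simp,
          List.dropLast_concat, hmiddle1, hmiddle2, pv_join_split1]
      rw [hAeq, hBeq]

-- ===== VERDICT (by name: the statement is the Claim_ definition above) =====
theorem extract_backtick_content_spec : Claim_equal_extract_backtick_content := by
  intro text _
  unfold Spec_extract_backtick_content extract_backtick_content extract_backtick_content_alt
  rw [pv_core_eq]
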